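-- pv_equiv track=rewrite | github.com/anishmajumder/codeforces | CodeForces Round 892 Div 2/unitedWeStand.py | unitedWeStand
-- ===== SOURCE A (Python) =====
-- def unitedWeStand(A):
--     B = []
--     C = []
--
--     A.sort()
--
--     for a in A:
--         if len(B) == 0:
--             B.append(a)
--             continue
--         for b in B:
--             if b%a == 0:
--                 B.append(a)
--                 break
--         if B[-1] != a:
--             C.append(a)
--
--     return (B,C)
-- ===== SOURCE B (Python) =====
-- def unitedWeStand(A):
--     # After the in-place sort, an element joins B exactly when it divides the
--     # minimum (the first sorted element): one linear pass instead of A's inner scan.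
--     A.sort()
--     if not A:
--         return ([], [])
--     m = A[0]
--     B = [m]
--     C = []
--     for a in A[1:]:
--         if m % a == 0:
--             B.append(a)
--         else:
--             C.append(a)
--     return (B, C)
-- ===== Notes on version B (the rewrite author's own statement) =====
-- stated objective: alternative
-- what changed: B replaces A's inner scan over the growing list B with one linear pass that classifies each element by whether it divides the sorted minimum, using the fact that an element joins B exactly when it divides the minimum.
import Mathlib
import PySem

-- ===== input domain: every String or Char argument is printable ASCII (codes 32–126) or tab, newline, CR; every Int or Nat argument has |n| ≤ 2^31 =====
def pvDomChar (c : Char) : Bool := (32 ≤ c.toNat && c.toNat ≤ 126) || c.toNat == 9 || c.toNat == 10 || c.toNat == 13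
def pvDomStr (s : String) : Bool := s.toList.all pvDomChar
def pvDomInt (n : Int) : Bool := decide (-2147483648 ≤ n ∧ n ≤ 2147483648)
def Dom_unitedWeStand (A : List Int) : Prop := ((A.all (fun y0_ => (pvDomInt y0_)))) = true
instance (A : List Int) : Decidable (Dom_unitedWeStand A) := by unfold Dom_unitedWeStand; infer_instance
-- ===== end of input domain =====

-- B replaces A's inner scan of the growing list B with one linear pass against the
-- sorted minimum (an element joins B iff it divides the minimum): a different algorithm.
-- Both Pythons sort the argument in place; the equivalence proved is about the return value.

-- ===== PORT A =====
-- inner 'for b in B: if b%a == 0: B.append(a); break' — returns whether the break fired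
def pvInnerA : List Int → Int → Bool
  | [], _ => false
  | b :: bs, a => if PySem.Int.mod b a == 0 then true else pvInnerA bs a

-- outer 'for a in A' loop carrying B and C
def pvLoopA : List Int → List Int → List Int → List Int × List Int
  | [], B, C => (B, C)
  | a :: rest, B, C =>
    if B.length = 0 then pvLoopA rest (B ++ [a]) C
    else
      let B' := if pvInnerA B a then B ++ [a] else B
      -- B'[-1] != a : B' is nonempty here, pyGetD is exact
      let C' := if PySem.List.pyGetD B' (-1) 0 ≠ a then C ++ [a] else C
      pvLoopA rest B' C'

def unitedWeStand (A : List Int) : List Int × List Int :=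
  pvLoopA (PySem.List.sorted A (fun x => x) false) [] []

-- ===== PORT B =====
def unitedWeStand_alt (A : List Int) : List Int × List Int :=
  match PySem.List.sorted A (fun x => x) false with
  | [] => ([], [])
  | m :: rest =>
    rest.foldl (fun (p : List Int × List Int) a =>
      if PySem.Int.mod m a == 0 then (p.1 ++ [a], p.2) else (p.1, p.2 ++ [a])) ([m], [])

-- ===== PRECONDITION & SPEC =====
-- Pre_ excludes exactly the inputs on which A raises ZeroDivisionError (b % 0 for a zero
-- that is not the unique minimum): a list containing 0 together with a negative element
-- or a second 0.  B raises ZeroDivisionError on the same inputs.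
def Pre_unitedWeStand (A : List Int) : Prop :=
  (0 : Int) ∈ A → (A.count 0 = 1 ∧ ∀ x ∈ A, 0 ≤ x)
instance (A : List Int) : Decidable (Pre_unitedWeStand A) := by
  unfold Pre_unitedWeStand; infer_instance

def pvWitness_unitedWeStand : List Int := [2, 4, 3]

def Spec_unitedWeStand (A : List Int) (out : List Int × List Int) : Prop := out = unitedWeStand_alt A
instance (A : List Int) (out : List Int × List Int) : Decidable (Spec_unitedWeStand A out) := by unfold Spec_unitedWeStand; infer_instance

-- ===== CLAIM (what is proved, stated in full; the proofs are below) =====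
def Claim_equal_unitedWeStand : Prop := ∀ (A : List Int), Dom_unitedWeStand A → Pre_unitedWeStand A → Spec_unitedWeStand A (unitedWeStand A)

-- ===== LEMMAS AND PROOFS =====

lemma pvInnerA_iff (B : List Int) (a : Int) :
    pvInnerA B a = true ↔ ∃ b ∈ B, PySem.Int.mod b a = 0 := by
  induction B with
  | nil => simp [pvInnerA]
  | cons b bs ih =>
    by_cases h : PySem.Int.mod b a = 0 <;> simp [pvInnerA, h, ih]

-- the key invariant: with B nonempty, headed by m and consisting of divisors of m,
-- A's outer loop computes exactly B's fold
lemma pvLoopA_eq (rest : List Int) : ∀ (m : Int) (B C : List Int),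
    B.head? = some m → (∀ b ∈ B, b ∣ m) → (∀ a ∈ rest, a ≠ 0) →
    pvLoopA rest B C =
      rest.foldl (fun (p : List Int × List Int) a =>
        if PySem.Int.mod m a == 0 then (p.1 ++ [a], p.2) else (p.1, p.2 ++ [a])) (B, C) := by
  induction rest with
  | nil => intro m B C _ _ _; rfl
  | cons a rest ih =>
    intro m B C hhead hdvd hz
    have hBne : B ≠ [] := by intro h; rw [h] at hhead; simp at hhead
    have hmM : m ∈ B := by
      cases B with
      | nil => exact absurd rfl hBne
      | cons x xs => simp at hhead; simp [hhead]
    have ha0 : a ≠ 0 := hz a (by simp)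
    have hlen : ¬ B.length = 0 := by simp [List.length_eq_zero_iff, hBne]
    have hiff : pvInnerA B a = true ↔ a ∣ m := by
      rw [pvInnerA_iff]
      constructor
      · rintro ⟨b, hb, hmod⟩
        have : a ∣ b := (PySem.Int.mod_eq_zero_iff_dvd b a).mp hmod
        exact dvd_trans this (hdvd b hb)
      · intro h
        exact ⟨m, hmM, (PySem.Int.mod_eq_zero_iff_dvd m a).mpr h⟩
    by_cases hd : a ∣ m
    · have hin : pvInnerA B a = true := hiff.mpr hd
      have hmod : (PySem.Int.mod m a == 0) = true := by
        simp [(PySem.Int.mod_eq_zero_iff_dvd m a).mpr hd]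
      simp only [pvLoopA, hlen, if_false, hin, if_true,
        PySem.List.pyGetD_neg_one_append_singleton, ne_eq, not_true_eq_false,
        List.foldl_cons, hmod]
      exact ih m (B ++ [a]) C
        (by cases B with
            | nil => exact absurd rfl hBne
            | cons x xs => simpa using hhead)
        (by intro b hb
            rcases List.mem_append.mp hb with h | h
            · exact hdvd b h
            · simp at h; simpa [h] using hd)
        (fun x hx => hz x (by simp [hx]))
    · have hin : pvInnerA B a = false := by
        cases h : pvInnerA B a with
        | false => rfl
        | true => exact absurd (hiff.mp h) hd
      have hmod : (PySem.Int.mod m a == 0) = false := by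
        simp
        intro h
        exact hd ((PySem.Int.mod_eq_zero_iff_dvd m a).mp h)
      have hlast : PySem.List.pyGetD B (-1) 0 ≠ a := by
        rw [PySem.List.pyGetD_neg_one B 0 hBne]
        intro h
        exact hd (h ▸ hdvd _ (List.getLast_mem hBne))
      simp only [pvLoopA, hlen, if_false, hin, Bool.false_eq_true, ne_eq, hlast,
        not_false_eq_true, if_true, List.foldl_cons, hmod]
      exact ih m B (C ++ [a]) hhead hdvd (fun x hx => hz x (by simp [hx]))

-- under Pre_, the tail of the sorted list contains no zero
lemma pv_tail_ne_zero (A : List Int) (m : Int) (rest : List Int)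
    (hpre : Pre_unitedWeStand A)
    (hs : PySem.List.sorted A (fun x => x) false = m :: rest) :
    ∀ a ∈ rest, a ≠ 0 := by
  intro a ha h0
  subst h0
  have h0A : (0 : Int) ∈ A := by
    rw [← PySem.List.mem_sorted (key := fun x => x) (rev := false), hs]
    simp [ha]
  obtain ⟨hcount, hnn⟩ := hpre h0A
  have hmle : m ≤ 0 := by
    have := PySem.List.key_head_sorted_le A (fun x => x) hs 0 h0A
    simpa using this
  have hmA : m ∈ A := by
    rw [← PySem.List.mem_sorted (key := fun x => x) (rev := false), hs]; simp
  have hm0 : m = 0 := le_antisymm hmle (hnn m hmA)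
  have hperm : (PySem.List.sorted A (fun x => x) false).Perm A :=
    PySem.List.sorted_perm A (fun x => x) false
  have hc : (m :: rest).count 0 = 1 := by
    rw [← hs, hperm.count_eq, hcount]
  have : 1 ≤ rest.count 0 := List.one_le_count_iff.mpr ha
  rw [List.count_cons] at hc
  simp [hm0] at hc
  omega

-- ===== VERDICT (by name: the statement is the Claim_ definition above) =====
theorem unitedWeStand_spec : Claim_equal_unitedWeStand := by
  intro A _ hpre
  unfold Spec_unitedWeStand unitedWeStand unitedWeStand_alt
  cases hs : PySem.List.sorted A (fun x => x) false with
  | nil => rfl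
  | cons m rest =>
    have hz := pv_tail_ne_zero A m rest hpre hs
    have : pvLoopA (m :: rest) [] [] = pvLoopA rest [m] [] := by
      simp [pvLoopA]
    rw [this, pvLoopA_eq rest m [m] [] (by simp) (by simp) hz]
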